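-- pv_equiv track=rewrite | github.com/FlyingMedusa/KursPython | FINAL_Md_To_Html/moduleMdHtml.py | unordered_list
-- ===== SOURCE A (Python) =====
-- def unordered_list(line):
--     line = line.lstrip("\t")
--     line = line.lstrip(" ")
--     for el in line:
--         if el == "*":
--             line = line[1:]
--         elif el == "+":
--             line = line[1:]
--         elif el == "-":
--             line = line[1:]
--         elif el == " ":
--             return line
-- ===== SOURCE B (Python) =====
-- def unordered_list(line):
--     s = line.lstrip("\t").lstrip(" ")
--     j = s.find(" ")
--     if j == -1:
--         return None
--     k = sum(1 for c in s[:j] if c in "*+-")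
--     return s[k:]
-- ===== Notes on version B (the rewrite author's own statement) =====
-- stated objective: faster
-- what changed: Replaces A's mutate-the-string-while-iterating loop, which copies the remaining string once per list-marker character, with a direct computation: find the first space, count the marker characters before it, and return a single slice.
import Mathlib
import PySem

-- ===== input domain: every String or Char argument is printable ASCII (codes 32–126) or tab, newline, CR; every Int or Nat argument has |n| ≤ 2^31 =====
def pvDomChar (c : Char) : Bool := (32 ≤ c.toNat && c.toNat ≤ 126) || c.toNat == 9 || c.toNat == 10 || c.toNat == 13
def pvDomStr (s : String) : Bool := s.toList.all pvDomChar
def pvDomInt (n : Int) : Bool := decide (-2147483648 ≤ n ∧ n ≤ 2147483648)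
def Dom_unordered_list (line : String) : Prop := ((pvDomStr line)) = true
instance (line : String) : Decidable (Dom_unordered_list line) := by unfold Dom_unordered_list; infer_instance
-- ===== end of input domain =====

-- B replaces A's mutate-while-iterating loop (one string copy per marker) by find-first-space + marker count + one slice (measured faster).

-- ===== PORT A =====
-- exact port of Python's s.lstrip(c) for a single-character argument c (used by both Pythons)
def pvLstripChar (c : Char) : List Char → List Char
  | [] => []
  | x :: xs => if x = c then pvLstripChar c xs else x :: xs

-- the 'for el in line' loop: iterates the stripped string, slicing the accumulator per branch
def pvLoopA : List Char → List Char → Option String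
  | [], _ => none
  | e :: rest, cur =>
    if e = '*' then pvLoopA rest (PySem.List.slice cur (some 1) none)
    else if e = '+' then pvLoopA rest (PySem.List.slice cur (some 1) none)
    else if e = '-' then pvLoopA rest (PySem.List.slice cur (some 1) none)
    else if e = ' ' then some (String.ofList cur)
    else pvLoopA rest cur

def unordered_list (line : String) : Option String :=
  let s := pvLstripChar ' ' (pvLstripChar '\t' line.toList)
  pvLoopA s s

-- ===== PORT B =====
-- c in "*+-"
def pvIsMarker (c : Char) : Bool := PySem.Chars.isIn [c] ['*', '+', '-']

def unordered_list_alt (line : String) : Option String :=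
  let s := pvLstripChar ' ' (pvLstripChar '\t' line.toList)
  let j := PySem.Chars.find s [' ']
  if j = -1 then none
  else
    let k : Nat := (PySem.List.slice s none (some j)).countP pvIsMarker
    some (String.ofList (PySem.List.slice s (some (k : Int)) none))

-- ===== PRECONDITION & SPEC =====
def Spec_unordered_list (line : String) (out : Option String) : Prop := out = unordered_list_alt line
instance (line : String) (out : Option String) : Decidable (Spec_unordered_list line out) := by unfold Spec_unordered_list; infer_instance

-- ===== CLAIM (what is proved, stated in full; the proofs are below) =====
def Claim_equal_unordered_list : Prop := ∀ (line : String), Dom_unordered_list line → Spec_unordered_list line (unordered_list line)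

-- ===== LEMMAS AND PROOFS =====

-- single-character membership: [c] infix of a list iff c is an element
lemma pvSingleton_infix {c : Char} {l : List Char} : [c] <:+: l ↔ c ∈ l := by
  constructor
  · intro ⟨p, q, hpq⟩
    subst hpq; simp
  · intro hc
    obtain ⟨p, q, hpq⟩ := List.append_of_mem hc
    exact ⟨p, q, by simp [hpq]⟩

lemma pvLoopA_none (iter cur : List Char) (h : ∀ c ∈ iter, c ≠ ' ') :
    pvLoopA iter cur = none := by
  induction iter generalizing cur with
  | nil => rfl
  | cons e rest ih =>
    have he := h e (by simp)
    have hr : ∀ c ∈ rest, c ≠ ' ' := fun c hc => h c (by simp [hc])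
    by_cases h1 : e = '*' <;> by_cases h2 : e = '+' <;> by_cases h3 : e = '-' <;>
      simp [pvLoopA, h1, h2, h3, he, ih _ hr]

lemma pvLoopA_found (pre suf cur : List Char) (h : ∀ c ∈ pre, c ≠ ' ') :
    pvLoopA (pre ++ ' ' :: suf) cur
      = some (String.ofList (cur.drop (pre.countP pvIsMarker))) := by
  induction pre generalizing cur with
  | nil =>
    simp [pvLoopA]
  | cons e rest ih =>
    have he := h e (by simp)
    have hr : ∀ c ∈ rest, c ≠ ' ' := fun c hc => h c (by simp [hc])
    have hm1 : pvIsMarker '*' = true := by decide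
    have hm2 : pvIsMarker '+' = true := by decide
    have hm3 : pvIsMarker '-' = true := by decide
    by_cases h1 : e = '*'
    · simp [pvLoopA, h1, ih _ hr, PySem.List.slice_from_one, hm1]
    · by_cases h2 : e = '+'
      · simp [pvLoopA, h2, ih _ hr, PySem.List.slice_from_one, hm2]
      · by_cases h3 : e = '-'
        · simp [pvLoopA, h3, ih _ hr, PySem.List.slice_from_one, hm3]
        · have hm : pvIsMarker e = false := by
            apply (PySem.Chars.isIn_eq_false_iff _ _).mpr
            intro h
            have := pvSingleton_infix.mp h
            simp at this
            rcases this with h' | h' | h' <;> [exact h1 h'; exact h2 h'; exact h3 h']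
          simp [pvLoopA, h1, h2, h3, he, ih _ hr, hm]

theorem unordered_list_spec : Claim_equal_unordered_list := by
  intro line _
  unfold Spec_unordered_list unordered_list unordered_list_alt
  set s := pvLstripChar ' ' (pvLstripChar '\t' line.toList) with hs
  by_cases hj : PySem.Chars.find s [' '] = -1
  · have hin : ¬ [' '] <:+: s := (PySem.Chars.find_eq_neg_one_iff s [' ']).mp hj
    have hmem : ∀ c ∈ s, c ≠ ' ' := by
      intro c hc hce; exact hin (pvSingleton_infix.mpr (hce ▸ hc))
    simp [hj, pvLoopA_none s s hmem]
  · have hge : 0 ≤ PySem.Chars.find s [' '] := by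
      have := PySem.Chars.neg_one_le_find s [' ']
      omega
    obtain ⟨hpre, hmin⟩ := PySem.Chars.find_spec (s := s) (sub := [' ']) hge
    set n := (PySem.Chars.find s [' ']).toNat with hn
    obtain ⟨t, ht⟩ := hpre
    have hns : s = s.take n ++ ' ' :: t := by
      conv_lhs => rw [← List.take_append_drop n s, ← ht]
      simp
    have hnosp : ∀ c ∈ s.take n, c ≠ ' ' := by
      intro c hc hce
      obtain ⟨i, hi, hgi⟩ := List.mem_take_iff_getElem.mp hc
      have hilt : i < n := lt_of_lt_of_le hi (min_le_left _ _)
      apply hmin i hilt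
      have hidx : i < s.length := by
        have : n ≤ s.length := by
          by_contra hc'
          have : s.drop n = [] := List.drop_eq_nil_of_le (by omega)
          simp [this] at ht
        omega
      exact ⟨s.drop (i+1), by rw [← List.getElem_cons_drop hidx]; simp [hgi, hce]⟩
    have hA := pvLoopA_found (s.take n) t s hnosp
    rw [← hns] at hA
    have hto : PySem.List.slice s none (some (PySem.Chars.find s [' '])) = s.take n := by
      rw [PySem.List.slice_to _ hge, ← hn]
    have hfrom : PySem.List.slice s (some (((s.take n).countP pvIsMarker : Nat) : Int)) none
        = s.drop ((s.take n).countP pvIsMarker) := by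
      rw [PySem.List.slice_from_natCast]
    simp only [hA, hto, hfrom, if_neg hj]
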